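-- pv_equiv track=rewrite | github.com/sfgray26/CBB_Betting | backend/services/scoring_engine.py | _determine_primary_position
-- ===== SOURCE A (Python) =====
-- from typing import Optional
--
-- def _determine_primary_position(positions: list[str]) -> Optional[str]:
--     """
--     Determine primary position from list of eligible positions.
--
--     Prioritizes scarcest positions for fantasy baseball value assessment:
--     C > SS > 2B > 3B > OF > 1B > DH (for hitters)
--     SP > RP (for pitchers)
--
--     Args:
--         positions: List of position strings ["SS", "OF", "C", etc.]
--
--     Returns:
--         Single primary position string or None if empty list
--     """
--     if not positions:
--         return None
--
--     # Define position priority (scarcest first)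
--     hitter_priority = ["C", "SS", "2B", "3B", "OF", "1B", "DH"]
--     pitcher_priority = ["SP", "RP"]
--
--     # Check if any hitting positions exist
--     has_hitting = any(p in hitter_priority for p in positions)
--     has_pitching = any(p in pitcher_priority for p in positions)
--
--     if has_hitting:
--         # Return scarcest hitting position
--         for pos in hitter_priority:
--             if pos in positions:
--                 return pos
--     elif has_pitching:
--         # Return scarcest pitching position
--         for pos in pitcher_priority:
--             if pos in positions:
--                 return pos
--
--     # Fallback to first position or OF for outfielders
--     if "OF" in positions:
--         return "OF"
--     return positions[0] if positions else None
-- ===== SOURCE B (Python) =====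
-- from typing import Optional
--
-- _ORDER = ["C", "SS", "2B", "3B", "OF", "1B", "DH", "SP", "RP"]
-- _RANK = {p: i for i, p in enumerate(_ORDER)}
--
-- def _determine_primary_position(positions: list[str]) -> Optional[str]:
--     if not positions:
--         return None
--     best = min((_RANK[p] for p in positions if p in _RANK), default=None)
--     return _ORDER[best] if best is not None else positions[0]
-- ===== Notes on version B (the rewrite author's own statement) =====
-- stated objective: idiomatic
-- what changed: Replaces A's two priority-list scans with repeated membership tests (plus any()-prechecks and an OF fallback) by one precomputed rank dictionary over the combined priority order and a single minimum-rank pass over the input positions.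
import Mathlib
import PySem

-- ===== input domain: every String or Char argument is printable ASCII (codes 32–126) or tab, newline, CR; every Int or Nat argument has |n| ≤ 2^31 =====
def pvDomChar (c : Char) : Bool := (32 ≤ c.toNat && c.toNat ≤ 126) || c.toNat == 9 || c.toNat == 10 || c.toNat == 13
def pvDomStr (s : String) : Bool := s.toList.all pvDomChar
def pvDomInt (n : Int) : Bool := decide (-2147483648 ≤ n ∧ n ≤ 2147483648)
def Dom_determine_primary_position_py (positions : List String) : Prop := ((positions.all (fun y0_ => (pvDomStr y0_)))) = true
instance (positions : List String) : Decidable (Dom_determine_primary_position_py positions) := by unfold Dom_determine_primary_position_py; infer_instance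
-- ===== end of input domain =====

-- B replaces A's two priority-list scans with membership tests by a single rank
-- dictionary over the combined priority order and one minimum-rank pass over the
-- input (objective: idiomatic).

-- ===== PORT A =====
-- literal transliteration of _determine_primary_position; the early-returning
-- 'for pos in …: if pos in positions: return pos' loops become List.find?
def determine_primary_position_py (positions : List String) : Option String :=
  if positions = [] then none
  else
    let hitter_priority : List String := ["C", "SS", "2B", "3B", "OF", "1B", "DH"]
    let pitcher_priority : List String := ["SP", "RP"]
    let has_hitting := positions.any (fun p => hitter_priority.contains p)
    let has_pitching := positions.any (fun p => pitcher_priority.contains p)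
    let fallback : Option String :=
      if positions.contains "OF" then some "OF"
      else if positions.isEmpty then none else PySem.List.pyGet? positions 0
    if has_hitting then
      match hitter_priority.find? (fun pos => positions.contains pos) with
      | some pos => some pos
      | none => fallback
    else if has_pitching then
      match pitcher_priority.find? (fun pos => positions.contains pos) with
      | some pos => some pos
      | none => fallback
    else fallback

-- ===== PORT B =====
-- _ORDER and _RANK = {p: i for i, p in enumerate(_ORDER)} from Source B
def pvOrder : List String := ["C", "SS", "2B", "3B", "OF", "1B", "DH", "SP", "RP"]
def pvRank : PySem.Dict String Int :=
  (PySem.List.enumerate pvOrder).foldl (fun d ip => d.insert ip.2 ip.1) PySem.Dict.empty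

-- min((_RANK[p] for p in positions if p in _RANK), default=None) is
-- PySem.List.min? over the filterMap of the dict lookups
def determine_primary_position_py_alt (positions : List String) : Option String :=
  if positions = [] then none
  else
    match PySem.List.min? (positions.filterMap (fun p => pvRank.get? p)) (fun x => x) with
    | some i => PySem.List.pyGet? pvOrder i
    | none => PySem.List.pyGet? positions 0

-- ===== PRECONDITION & SPEC =====
def Spec_determine_primary_position_py (positions : List String) (out : Option String) : Prop := out = determine_primary_position_py_alt positions
instance (positions : List String) (out : Option String) : Decidable (Spec_determine_primary_position_py positions out) := by unfold Spec_determine_primary_position_py; infer_instance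

-- ===== CLAIM (what is proved, stated in full; the proofs are below) =====
def Claim_equal_determine_primary_position_py : Prop := ∀ (positions : List String), Dom_determine_primary_position_py positions → Spec_determine_primary_position_py positions (determine_primary_position_py positions)

-- ===== LEMMAS AND PROOFS =====

-- the rank dictionary, characterised as a lookup chain
lemma pvRank_get (p : String) : pvRank.get? p =
    if p = "C" then some 0 else if p = "SS" then some 1 else if p = "2B" then some 2
    else if p = "3B" then some 3 else if p = "OF" then some 4 else if p = "1B" then some 5
    else if p = "DH" then some 6 else if p = "SP" then some 7 else if p = "RP" then some 8
    else none := by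
  have h : pvRank = PySem.Dict.mk [("C", 0), ("SS", 1), ("2B", 2), ("3B", 3), ("OF", 4),
      ("1B", 5), ("DH", 6), ("SP", 7), ("RP", 8)] := by decide
  rw [h]
  simp [PySem.Dict.get?_mk_cons, beq_iff_eq]
  simp [PySem.Dict.get?, @eq_comm String]

-- the minimum of the rank list is k once k is a member and a lower bound
lemma pv_min_ranks (positions : List String) (k : Int)
    (hmem : k ∈ positions.filterMap (fun p => pvRank.get? p))
    (hlow : ∀ j ∈ positions.filterMap (fun p => pvRank.get? p), k ≤ j) :
    PySem.List.min? (positions.filterMap (fun p => pvRank.get? p)) (fun x => x) = some k := by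
  cases h : PySem.List.min? (positions.filterMap (fun p => pvRank.get? p)) (fun x => x) with
  | none =>
      rw [PySem.List.min?_eq_none_iff] at h
      rw [h] at hmem; cases hmem
  | some m =>
      have h1 := PySem.List.min?_mem h
      have h2 := PySem.List.min?_isMin h k hmem
      have h3 := hlow m h1
      rw [le_antisymm h2 h3]

lemma pv_case0 (positions : List String) (h0 : positions ≠ [])  (hm0 : "C" ∈ positions) :
    determine_primary_position_py positions = determine_primary_position_py_alt positions := by
  have hmem : (0 : Int) ∈ positions.filterMap (fun p => pvRank.get? p) :=
    List.mem_filterMap.mpr ⟨"C", hm0, by decide⟩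
  have hlow : ∀ j ∈ positions.filterMap (fun p => pvRank.get? p), (0 : Int) ≤ j := by
    intro j hj
    obtain ⟨p, hp, hr⟩ := List.mem_filterMap.mp hj
    rw [pvRank_get] at hr
    split_ifs at hr <;> simp_all <;> omega
  have hmin := pv_min_ranks positions 0 hmem hlow
  simp [determine_primary_position_py, determine_primary_position_py_alt, h0, hmin, hm0, List.find?]
  rw [if_pos ⟨"C", hm0, by simp⟩]
  decide

lemma pv_case1 (positions : List String) (h0 : positions ≠ []) (hm0 : "C" ∉ positions) (hm1 : "SS" ∈ positions) :
    determine_primary_position_py positions = determine_primary_position_py_alt positions := by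
  have hmem : (1 : Int) ∈ positions.filterMap (fun p => pvRank.get? p) :=
    List.mem_filterMap.mpr ⟨"SS", hm1, by decide⟩
  have hlow : ∀ j ∈ positions.filterMap (fun p => pvRank.get? p), (1 : Int) ≤ j := by
    intro j hj
    obtain ⟨p, hp, hr⟩ := List.mem_filterMap.mp hj
    rw [pvRank_get] at hr
    split_ifs at hr <;> simp_all <;> omega
  have hmin := pv_min_ranks positions 1 hmem hlow
  simp [determine_primary_position_py, determine_primary_position_py_alt, h0, hmin, hm0, hm1, List.find?]
  rw [if_pos ⟨"SS", hm1, by simp⟩]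
  decide

lemma pv_case2 (positions : List String) (h0 : positions ≠ []) (hm0 : "C" ∉ positions) (hm1 : "SS" ∉ positions) (hm2 : "2B" ∈ positions) :
    determine_primary_position_py positions = determine_primary_position_py_alt positions := by
  have hmem : (2 : Int) ∈ positions.filterMap (fun p => pvRank.get? p) :=
    List.mem_filterMap.mpr ⟨"2B", hm2, by decide⟩
  have hlow : ∀ j ∈ positions.filterMap (fun p => pvRank.get? p), (2 : Int) ≤ j := by
    intro j hj
    obtain ⟨p, hp, hr⟩ := List.mem_filterMap.mp hj
    rw [pvRank_get] at hr
    split_ifs at hr <;> simp_all <;> omega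
  have hmin := pv_min_ranks positions 2 hmem hlow
  simp [determine_primary_position_py, determine_primary_position_py_alt, h0, hmin, hm0, hm1, hm2, List.find?]
  rw [if_pos ⟨"2B", hm2, by simp⟩]
  decide

lemma pv_case3 (positions : List String) (h0 : positions ≠ []) (hm0 : "C" ∉ positions) (hm1 : "SS" ∉ positions) (hm2 : "2B" ∉ positions) (hm3 : "3B" ∈ positions) :
    determine_primary_position_py positions = determine_primary_position_py_alt positions := by
  have hmem : (3 : Int) ∈ positions.filterMap (fun p => pvRank.get? p) :=
    List.mem_filterMap.mpr ⟨"3B", hm3, by decide⟩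
  have hlow : ∀ j ∈ positions.filterMap (fun p => pvRank.get? p), (3 : Int) ≤ j := by
    intro j hj
    obtain ⟨p, hp, hr⟩ := List.mem_filterMap.mp hj
    rw [pvRank_get] at hr
    split_ifs at hr <;> simp_all <;> omega
  have hmin := pv_min_ranks positions 3 hmem hlow
  simp [determine_primary_position_py, determine_primary_position_py_alt, h0, hmin, hm0, hm1, hm2, hm3, List.find?]
  rw [if_pos ⟨"3B", hm3, by simp⟩]
  decide

lemma pv_case4 (positions : List String) (h0 : positions ≠ []) (hm0 : "C" ∉ positions) (hm1 : "SS" ∉ positions) (hm2 : "2B" ∉ positions) (hm3 : "3B" ∉ positions) (hm4 : "OF" ∈ positions) :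
    determine_primary_position_py positions = determine_primary_position_py_alt positions := by
  have hmem : (4 : Int) ∈ positions.filterMap (fun p => pvRank.get? p) :=
    List.mem_filterMap.mpr ⟨"OF", hm4, by decide⟩
  have hlow : ∀ j ∈ positions.filterMap (fun p => pvRank.get? p), (4 : Int) ≤ j := by
    intro j hj
    obtain ⟨p, hp, hr⟩ := List.mem_filterMap.mp hj
    rw [pvRank_get] at hr
    split_ifs at hr <;> simp_all <;> omega
  have hmin := pv_min_ranks positions 4 hmem hlow
  simp [determine_primary_position_py, determine_primary_position_py_alt, h0, hmin, hm0, hm1, hm2, hm3, hm4, List.find?]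
  rw [if_pos ⟨"OF", hm4, by simp⟩]
  decide

lemma pv_case5 (positions : List String) (h0 : positions ≠ []) (hm0 : "C" ∉ positions) (hm1 : "SS" ∉ positions) (hm2 : "2B" ∉ positions) (hm3 : "3B" ∉ positions) (hm4 : "OF" ∉ positions) (hm5 : "1B" ∈ positions) :
    determine_primary_position_py positions = determine_primary_position_py_alt positions := by
  have hmem : (5 : Int) ∈ positions.filterMap (fun p => pvRank.get? p) :=
    List.mem_filterMap.mpr ⟨"1B", hm5, by decide⟩
  have hlow : ∀ j ∈ positions.filterMap (fun p => pvRank.get? p), (5 : Int) ≤ j := by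
    intro j hj
    obtain ⟨p, hp, hr⟩ := List.mem_filterMap.mp hj
    rw [pvRank_get] at hr
    split_ifs at hr <;> simp_all <;> omega
  have hmin := pv_min_ranks positions 5 hmem hlow
  simp [determine_primary_position_py, determine_primary_position_py_alt, h0, hmin, hm0, hm1, hm2, hm3, hm4, hm5, List.find?]
  rw [if_pos ⟨"1B", hm5, by simp⟩]
  decide

lemma pv_case6 (positions : List String) (h0 : positions ≠ []) (hm0 : "C" ∉ positions) (hm1 : "SS" ∉ positions) (hm2 : "2B" ∉ positions) (hm3 : "3B" ∉ positions) (hm4 : "OF" ∉ positions) (hm5 : "1B" ∉ positions) (hm6 : "DH" ∈ positions) :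
    determine_primary_position_py positions = determine_primary_position_py_alt positions := by
  have hmem : (6 : Int) ∈ positions.filterMap (fun p => pvRank.get? p) :=
    List.mem_filterMap.mpr ⟨"DH", hm6, by decide⟩
  have hlow : ∀ j ∈ positions.filterMap (fun p => pvRank.get? p), (6 : Int) ≤ j := by
    intro j hj
    obtain ⟨p, hp, hr⟩ := List.mem_filterMap.mp hj
    rw [pvRank_get] at hr
    split_ifs at hr <;> simp_all <;> omega
  have hmin := pv_min_ranks positions 6 hmem hlow
  simp [determine_primary_position_py, determine_primary_position_py_alt, h0, hmin, hm0, hm1, hm2, hm3, hm4, hm5, hm6, List.find?]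
  rw [if_pos ⟨"DH", hm6, by simp⟩]
  decide

lemma pv_case7 (positions : List String) (h0 : positions ≠ []) (hm0 : "C" ∉ positions) (hm1 : "SS" ∉ positions) (hm2 : "2B" ∉ positions) (hm3 : "3B" ∉ positions) (hm4 : "OF" ∉ positions) (hm5 : "1B" ∉ positions) (hm6 : "DH" ∉ positions) (hm7 : "SP" ∈ positions) :
    determine_primary_position_py positions = determine_primary_position_py_alt positions := by
  have hmem : (7 : Int) ∈ positions.filterMap (fun p => pvRank.get? p) :=
    List.mem_filterMap.mpr ⟨"SP", hm7, by decide⟩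
  have hlow : ∀ j ∈ positions.filterMap (fun p => pvRank.get? p), (7 : Int) ≤ j := by
    intro j hj
    obtain ⟨p, hp, hr⟩ := List.mem_filterMap.mp hj
    rw [pvRank_get] at hr
    split_ifs at hr <;> simp_all <;> omega
  have hmin := pv_min_ranks positions 7 hmem hlow
  simp [determine_primary_position_py, determine_primary_position_py_alt, h0, hmin, hm0, hm1, hm2, hm3, hm4, hm5, hm6, hm7, List.find?]
  rw [if_neg (by rintro ⟨x, hx, rfl|rfl|rfl|rfl|rfl|rfl|rfl⟩ <;> simp_all),
      if_pos ⟨"SP", hm7, by simp⟩]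
  decide

lemma pv_case8 (positions : List String) (h0 : positions ≠ []) (hm0 : "C" ∉ positions) (hm1 : "SS" ∉ positions) (hm2 : "2B" ∉ positions) (hm3 : "3B" ∉ positions) (hm4 : "OF" ∉ positions) (hm5 : "1B" ∉ positions) (hm6 : "DH" ∉ positions) (hm7 : "SP" ∉ positions) (hm8 : "RP" ∈ positions) :
    determine_primary_position_py positions = determine_primary_position_py_alt positions := by
  have hmem : (8 : Int) ∈ positions.filterMap (fun p => pvRank.get? p) :=
    List.mem_filterMap.mpr ⟨"RP", hm8, by decide⟩
  have hlow : ∀ j ∈ positions.filterMap (fun p => pvRank.get? p), (8 : Int) ≤ j := by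
    intro j hj
    obtain ⟨p, hp, hr⟩ := List.mem_filterMap.mp hj
    rw [pvRank_get] at hr
    split_ifs at hr <;> simp_all <;> omega
  have hmin := pv_min_ranks positions 8 hmem hlow
  simp [determine_primary_position_py, determine_primary_position_py_alt, h0, hmin, hm0, hm1, hm2, hm3, hm4, hm5, hm6, hm7, hm8, List.find?]
  rw [if_neg (by rintro ⟨x, hx, rfl|rfl|rfl|rfl|rfl|rfl|rfl⟩ <;> simp_all),
      if_pos ⟨"RP", hm8, by simp⟩]
  decide

lemma pv_case_none (positions : List String) (h0 : positions ≠ []) (hm0 : "C" ∉ positions) (hm1 : "SS" ∉ positions) (hm2 : "2B" ∉ positions) (hm3 : "3B" ∉ positions) (hm4 : "OF" ∉ positions) (hm5 : "1B" ∉ positions) (hm6 : "DH" ∉ positions) (hm7 : "SP" ∉ positions) (hm8 : "RP" ∉ positions) :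
    determine_primary_position_py positions = determine_primary_position_py_alt positions := by
  have hnil : positions.filterMap (fun p => pvRank.get? p) = [] := by
    rw [List.filterMap_eq_nil_iff]
    intro p hp
    rw [pvRank_get]
    split_ifs <;> simp_all
  have hmin : PySem.List.min? (positions.filterMap (fun p => pvRank.get? p)) (fun x => x) = none := by
    rw [hnil, PySem.List.min?_eq_none_iff]
  simp [determine_primary_position_py, determine_primary_position_py_alt, h0, hmin, hm0, hm1, hm2, hm3, hm4, hm5, hm6, hm7, hm8, List.find?]

-- ===== VERDICT (by name: the statement is the Claim_ definition above) =====
theorem determine_primary_position_py_spec : Claim_equal_determine_primary_position_py := by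
  intro positions _
  unfold Spec_determine_primary_position_py
  by_cases h0 : positions = []
  · rw [h0]; rfl
  · by_cases hm0 : "C" ∈ positions
    · exact pv_case0 positions h0 hm0
    · 
      by_cases hm1 : "SS" ∈ positions
      · exact pv_case1 positions h0 hm0 hm1
      · 
        by_cases hm2 : "2B" ∈ positions
        · exact pv_case2 positions h0 hm0 hm1 hm2
        · 
          by_cases hm3 : "3B" ∈ positions
          · exact pv_case3 positions h0 hm0 hm1 hm2 hm3
          · 
            by_cases hm4 : "OF" ∈ positions
            · exact pv_case4 positions h0 hm0 hm1 hm2 hm3 hm4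
            · 
              by_cases hm5 : "1B" ∈ positions
              · exact pv_case5 positions h0 hm0 hm1 hm2 hm3 hm4 hm5
              · 
                by_cases hm6 : "DH" ∈ positions
                · exact pv_case6 positions h0 hm0 hm1 hm2 hm3 hm4 hm5 hm6
                · 
                  by_cases hm7 : "SP" ∈ positions
                  · exact pv_case7 positions h0 hm0 hm1 hm2 hm3 hm4 hm5 hm6 hm7
                  · 
                    by_cases hm8 : "RP" ∈ positions
                    · exact pv_case8 positions h0 hm0 hm1 hm2 hm3 hm4 hm5 hm6 hm7 hm8
                    · exact pv_case_none positions h0 hm0 hm1 hm2 hm3 hm4 hm5 hm6 hm7 hm8
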